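-- pv_equiv track=rewrite | github.com/Yuyi-hao/CSES-problemset | 02 Sorting and Searching/031/031.py | solve
-- ===== SOURCE A (Python) =====
-- def solve(n, m, values, swaps):
--     values.insert(0, 0)
--     res = []
--     position = [0] * (n + 1)
--     for i in range(1, n + 1):
--         position[values[i]] = i
--     count = 1
--     for i in range(1, n):
--         count += position[i] > position[i + 1]
--     updated_pairs = set()
--     for i in range(m):
--         l, r = swaps[i]
--         if values[l] + 1 <= n:
--             updated_pairs.add((values[l], values[l] + 1))
--         if values[l] - 1 >= 1:
--             updated_pairs.add((values[l] - 1, values[l]))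
--         if values[r] + 1 <= n:
--             updated_pairs.add((values[r], values[r] + 1))
--         if values[r] - 1 >= 1:
--             updated_pairs.add((values[r] - 1, values[r]))
--         for swapped in updated_pairs:
--             count -= position[swapped[0]] > position[swapped[1]]
--         values[l], values[r] = values[r], values[l]
--         position[values[l]] = l
--         position[values[r]] = r
--         for swapped in updated_pairs:
--             count += position[swapped[0]] > position[swapped[1]]
--         res.append(count)
--         updated_pairs.clear()
--     return res
-- ===== SOURCE B (Python) =====
-- def solve(n, m, values, swaps):
--     # Same in-place mutation as the original: prepend 0, swap values per query.
--     values.insert(0, 0)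
--     position = [0] * (n + 1)
--     for i in range(1, n + 1):
--         position[values[i]] = i
--     res = []
--     for i in range(m):
--         l, r = swaps[i]
--         values[l], values[r] = values[r], values[l]
--         position[values[l]] = l
--         position[values[r]] = r
--         res.append(1 + sum(1 for i in range(1, n) if position[i] > position[i + 1]))
--     return res
-- ===== Notes on version B (the rewrite author's own statement) =====
-- stated objective: simpler
-- what changed: A's incremental count maintenance (collect the up-to-4 affected adjacent pairs in a set, subtract their old contributions, swap, add their new ones) is replaced by a plain swap-and-update followed by a full recount 1 + sum(position[i] > position[i+1] for i in 1..n-1) on every query.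
-- outside the precondition, e.g. on solve(2, 1, [1, 2], [(0, 1)]): A returns [2], B returns [1]; on solve(2, 1, [0, 1], [(1, 2)]): A returns [3], B returns [2]
import Mathlib
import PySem

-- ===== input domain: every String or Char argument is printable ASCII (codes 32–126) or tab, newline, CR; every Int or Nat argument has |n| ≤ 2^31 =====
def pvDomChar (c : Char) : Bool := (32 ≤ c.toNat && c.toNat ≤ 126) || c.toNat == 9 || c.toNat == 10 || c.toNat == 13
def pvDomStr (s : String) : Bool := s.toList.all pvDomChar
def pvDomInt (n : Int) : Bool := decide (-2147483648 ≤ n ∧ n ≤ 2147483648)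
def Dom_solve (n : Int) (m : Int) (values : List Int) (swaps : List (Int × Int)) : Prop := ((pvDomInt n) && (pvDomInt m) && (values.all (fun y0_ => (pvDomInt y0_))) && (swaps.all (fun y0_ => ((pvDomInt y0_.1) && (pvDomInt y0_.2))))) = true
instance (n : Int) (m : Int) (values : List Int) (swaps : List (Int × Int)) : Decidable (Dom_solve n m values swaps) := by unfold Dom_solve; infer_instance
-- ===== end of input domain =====

-- B replaces A's incremental updated_pairs bookkeeping by a full rescan of the position
-- array after each swap (simpler; not faster). Both Pythons mutate `values` in place
-- (insert 0, per-query swaps); the equivalence proved here is about the return value only.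

-- ===== PORT A =====
-- the four 'if ...: updated_pairs.add(...)' statements of A's loop body
def solvePairs (n vl vr : Int) : PySem.Set (Int × Int) :=
  let updated_pairs : PySem.Set (Int × Int) := PySem.Set.empty
  let updated_pairs := if vl + 1 ≤ n then PySem.Set.add updated_pairs (vl, vl + 1) else updated_pairs
  let updated_pairs := if vl - 1 ≥ 1 then PySem.Set.add updated_pairs (vl - 1, vl) else updated_pairs
  let updated_pairs := if vr + 1 ≤ n then PySem.Set.add updated_pairs (vr, vr + 1) else updated_pairs
  let updated_pairs := if vr - 1 ≥ 1 then PySem.Set.add updated_pairs (vr - 1, vr) else updated_pairs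
  updated_pairs

-- loop body of A's 'for i in range(m)' (l, r = swaps[i] is passed as the pair lr)
def solveStepA (n : Int) (st : List Int × List Int × Int × List Int) (lr : Int × Int) :
    List Int × List Int × Int × List Int :=
  let vals := st.1
  let position := st.2.1
  let count := st.2.2.1
  let res := st.2.2.2
  let l := lr.1
  let r := lr.2
  let updated_pairs : PySem.Set (Int × Int) :=
      solvePairs n (PySem.List.pyGetD vals l 0) (PySem.List.pyGetD vals r 0)
  let count := updated_pairs.foldl (fun c p =>
      c - (if PySem.List.pyGetD position p.1 0 > PySem.List.pyGetD position p.2 0 then 1 else 0)) count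
  let vl := PySem.List.pyGetD vals l 0
  let vr := PySem.List.pyGetD vals r 0
  let vals := PySem.List.pySetD (PySem.List.pySetD vals l vr) r vl
  let position := PySem.List.pySetD position (PySem.List.pyGetD vals l 0) l
  let position := PySem.List.pySetD position (PySem.List.pyGetD vals r 0) r
  let count := updated_pairs.foldl (fun c p =>
      c + (if PySem.List.pyGetD position p.1 0 > PySem.List.pyGetD position p.2 0 then 1 else 0)) count
  (vals, position, count, res ++ [count])

def solve (n : Int) (m : Int) (values : List Int) (swaps : List (Int × Int)) : List Int :=
  let vals : List Int := 0 :: values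
  let position : List Int := List.replicate (n + 1).toNat 0
  let position := (PySem.List.pyRange 1 (n + 1) 1).foldl
      (fun pos i => PySem.List.pySetD pos (PySem.List.pyGetD vals i 0) i) position
  let count : Int := (PySem.List.pyRange 1 n 1).foldl
      (fun c i => c + (if PySem.List.pyGetD position i 0 > PySem.List.pyGetD position (i + 1) 0 then 1 else 0)) 1
  let st := (PySem.List.pyRange 0 m 1).foldl
      (fun st i => solveStepA n st (PySem.List.pyGetD swaps i (0, 0)))
      (vals, position, count, ([] : List Int))
  st.2.2.2

-- ===== PORT B =====
-- loop body of B's 'for i in range(m)': swap, update positions, rescan from scratch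
def solveStepB (n : Int) (st : List Int × List Int × List Int) (lr : Int × Int) :
    List Int × List Int × List Int :=
  let vals := st.1
  let position := st.2.1
  let res := st.2.2
  let l := lr.1
  let r := lr.2
  let vl := PySem.List.pyGetD vals l 0
  let vr := PySem.List.pyGetD vals r 0
  let vals := PySem.List.pySetD (PySem.List.pySetD vals l vr) r vl
  let position := PySem.List.pySetD position (PySem.List.pyGetD vals l 0) l
  let position := PySem.List.pySetD position (PySem.List.pyGetD vals r 0) r
  (vals, position, res ++ [1 + ((PySem.List.pyRange 1 n 1).map
      (fun j => if PySem.List.pyGetD position j 0 > PySem.List.pyGetD position (j + 1) 0 then (1 : Int) else 0)).sum])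

def solve_alt (n : Int) (m : Int) (values : List Int) (swaps : List (Int × Int)) : List Int :=
  let vals : List Int := 0 :: values
  let position : List Int := List.replicate (n + 1).toNat 0
  let position := (PySem.List.pyRange 1 (n + 1) 1).foldl
      (fun pos i => PySem.List.pySetD pos (PySem.List.pyGetD vals i 0) i) position
  let st := (PySem.List.pyRange 0 m 1).foldl
      (fun st i => solveStepB n st (PySem.List.pyGetD swaps i (0, 0)))
      (vals, position, ([] : List Int))
  st.2.2

-- ===== PRECONDITION & SPEC =====
-- Pre_ restricts to the task's natural domain (positions are 1-based, values a list of at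
-- least n entries whose first n lie in 1..n, the first m swap indices in 1..n). Outside it
-- A raises IndexError, or returns a count skewed by stale position[0] entries or Python
-- negative-index wraparound — accidental behaviour of A's incremental bookkeeping.
def Pre_solve (n : Int) (m : Int) (values : List Int) (swaps : List (Int × Int)) : Prop :=
  m ≤ (swaps.length : Int) ∧ n ≤ (values.length : Int) ∧
  (∀ x ∈ values.take n.toNat, 1 ≤ x ∧ x ≤ n) ∧
  (∀ p ∈ swaps.take m.toNat, 1 ≤ p.1 ∧ p.1 ≤ n ∧ 1 ≤ p.2 ∧ p.2 ≤ n)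
instance (n : Int) (m : Int) (values : List Int) (swaps : List (Int × Int)) : Decidable (Pre_solve n m values swaps) := by unfold Pre_solve; infer_instance

def pvWitness_solve : Int × Int × List Int × (List (Int × Int)) := (3, 2, [2, 3, 1], [(1, 2), (2, 3)])

def Spec_solve (n : Int) (m : Int) (values : List Int) (swaps : List (Int × Int)) (out : List Int) : Prop := out = solve_alt n m values swaps
instance (n : Int) (m : Int) (values : List Int) (swaps : List (Int × Int)) (out : List Int) : Decidable (Spec_solve n m values swaps out) := by unfold Spec_solve; infer_instance

-- ===== CLAIM (what is proved, stated in full; the proofs are below) =====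
def Claim_equal_solve : Prop := ∀ (n : Int) (m : Int) (values : List Int) (swaps : List (Int × Int)), Dom_solve n m values swaps → Pre_solve n m values swaps → Spec_solve n m values swaps (solve n m values swaps)

-- ===== LEMMAS AND PROOFS =====

-- 0/1 contribution of an adjacent pair q under the position array pos
def pvPair (pos : List Int) (q : Int × Int) : Int :=
  if PySem.List.pyGetD pos q.1 0 > PySem.List.pyGetD pos q.2 0 then 1 else 0

-- full rescan sum: number of i in 1..n-1 with position[i] > position[i+1]
def pvF (n : Int) (pos : List Int) : Int :=
  ((PySem.List.pyRange 1 n 1).map (fun j => pvPair pos (j, j + 1))).sum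

theorem pv_foldl_sub {α : Type} (l : List α) (g : α → Int) (a : Int) :
    l.foldl (fun c x => c - g x) a = a - (l.map g).sum := by
  induction l generalizing a with
  | nil => simp
  | cons x xs ih => simp [ih]; ring

theorem pv_sum_map_sub {α : Type} (l : List α) (f g : α → Int) :
    (l.map (fun x => f x - g x)).sum = (l.map f).sum - (l.map g).sum := by
  induction l with
  | nil => simp
  | cons x xs ih => simp [ih]; ring

-- a nodup list of adjacent pairs sums like the sub-range of 1..n-1 it covers
theorem pv_sum_exchange (P : List (Int × Int)) (hP : P.Nodup) (L : List Int) (hL : L.Nodup)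
    (d : Int × Int → Int)
    (hsub : ∀ p ∈ P, ∃ i ∈ L, p = (i, i + 1))
    (hz : ∀ i ∈ L, (i, i + 1) ∉ P → d (i, i + 1) = 0) :
    (P.map d).sum = (L.map (fun i => d (i, i + 1))).sum := by
  have hinj : Set.InjOn (fun i : Int => (i, i + 1)) ↑L.toFinset := by
    intro x _ y _ h
    simpa using congrArg Prod.fst h
  rw [← List.sum_toFinset (fun q => d q) hP, ← List.sum_toFinset (fun i => d (i, i+1)) hL]
  rw [← Finset.sum_image (f := d) hinj]
  apply Finset.sum_subset
  · intro q hq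
    obtain ⟨i, hi, rfl⟩ := hsub q (List.mem_toFinset.mp hq)
    exact Finset.mem_image.mpr ⟨i, List.mem_toFinset.mpr hi, rfl⟩
  · intro q hq hnq
    obtain ⟨i, hi, rfl⟩ := Finset.mem_image.mp hq
    exact hz i (List.mem_toFinset.mp hi) (fun h => hnq (List.mem_toFinset.mpr h))

-- core step lemma: A's subtract-swap-add update keeps count = 1 + full rescan
theorem pv_count_step (n : Int) (pos : List Int) (hp : pos.length = (n + 1).toNat)
    (u v l r : Int) (hu1 : 1 ≤ u) (hv1 : 1 ≤ v) (P : List (Int × Int)) (hPn : P.Nodup)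
    (hPmem : ∀ p ∈ P, ∃ i : Int, p = (i, i + 1) ∧ 1 ≤ i ∧ i + 1 ≤ n)
    (hcov : ∀ i : Int, 1 ≤ i → i + 1 ≤ n → (i = u ∨ i = v ∨ i + 1 = u ∨ i + 1 = v) → (i, i + 1) ∈ P) :
    P.foldl (fun c q => c + pvPair (PySem.List.pySetD (PySem.List.pySetD pos v l) u r) q)
      (P.foldl (fun c q => c - pvPair pos q) (1 + pvF n pos))
    = 1 + pvF n (PySem.List.pySetD (PySem.List.pySetD pos v l) u r) := by
  set pos' := PySem.List.pySetD (PySem.List.pySetD pos v l) u r with hpos'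
  have hlen' : pos'.length = (n + 1).toNat := by
    rw [hpos', PySem.List.length_pySetD, PySem.List.length_pySetD, hp]
  rw [PySem.List.foldl_add, pv_foldl_sub]
  have hex := pv_sum_exchange P hPn (PySem.List.pyRange 1 n 1) (PySem.List.nodup_pyRange_one 1 n)
      (fun q => pvPair pos' q - pvPair pos q)
      (by
        intro p hpP
        obtain ⟨i, rfl, hi1, hi2⟩ := hPmem p hpP
        exact ⟨i, PySem.List.mem_pyRange_one.mpr ⟨hi1, by omega⟩, rfl⟩)
      (by
        intro i hiL hnot
        obtain ⟨hi1, hi2⟩ := PySem.List.mem_pyRange_one.mp hiL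
        have hne : i ≠ u ∧ i ≠ v ∧ i + 1 ≠ u ∧ i + 1 ≠ v := by
          by_contra hcontra
          push Not at hcontra
          apply hnot
          apply hcov i hi1 (by omega)
          by_cases h1 : i = u
          · exact Or.inl h1
          · by_cases h2 : i = v
            · exact Or.inr (Or.inl h2)
            · by_cases h3 : i + 1 = u
              · exact Or.inr (Or.inr (Or.inl h3))
              · exact Or.inr (Or.inr (Or.inr (hcontra h1 h2 h3)))
        obtain ⟨ha, hb, hc, hd⟩ := hne
        have hget : ∀ w : Int, 1 ≤ w → w ≤ n → w ≠ u → w ≠ v →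
            PySem.List.pyGetD pos' w 0 = PySem.List.pyGetD pos w 0 := by
          intro w hw1 hw2 hwu hwv
          rw [hpos', PySem.List.pySetD_of_nonneg _ _ (by omega),
              PySem.List.pySetD_of_nonneg _ _ (by omega)]
          rw [PySem.List.pyGetD_eq_getElem _ _ (by omega) (by simp [hp]; omega),
              PySem.List.pyGetD_eq_getElem _ _ (by omega) (by simp [hp]; omega)]
          rw [List.getElem_set_ne (by omega), List.getElem_set_ne (by omega)]
        simp only [pvPair]
        rw [hget i hi1 (by omega) ha hb, hget (i+1) (by omega) (by omega) hc hd]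
        ring)
  have hF : pvF n pos' - pvF n pos = (P.map (fun q => pvPair pos' q - pvPair pos q)).sum := by
    rw [hex]
    simp only [pvF]
    rw [List.map_congr_left (fun i _ => rfl)]
    exact (pv_sum_map_sub (PySem.List.pyRange 1 n 1) (fun j => pvPair pos' (j, j+1)) (fun j => pvPair pos (j, j+1))).symm
  rw [pv_sum_map_sub] at hF
  omega

theorem pv_pairs_mem (n u v : Int) : ∀ q : Int × Int, q ∈ solvePairs n u v ↔
    (u + 1 ≤ n ∧ q = (u, u + 1)) ∨ (u - 1 ≥ 1 ∧ q = (u - 1, u))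
    ∨ (v + 1 ≤ n ∧ q = (v, v + 1)) ∨ (v - 1 ≥ 1 ∧ q = (v - 1, v)) := by
  intro q
  unfold solvePairs
  split_ifs <;>
    simp only [PySem.Set.mem_add, PySem.Set.empty, List.not_mem_nil, false_or] <;>
    tauto

theorem pv_pairs_nodup (n u v : Int) : (solvePairs n u v).Nodup := by
  unfold solvePairs
  split_ifs <;>
    (repeat first
      | exact List.nodup_nil
      | apply PySem.Set.nodup_add)

-- main loop invariant: both loops keep the same values/position arrays and equal outputs
theorem pv_loop_agree (n : Int) (sw : List (Int × Int))
    (hsw : ∀ p ∈ sw, 1 ≤ p.1 ∧ p.1 ≤ n ∧ 1 ≤ p.2 ∧ p.2 ≤ n)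
    (vals pos : List Int) (count : Int) (res : List Int)
    (hvlen : n < (vals.length : Int))
    (hvals : ∀ j : Int, 1 ≤ j → j ≤ n → 1 ≤ PySem.List.pyGetD vals j 0 ∧ PySem.List.pyGetD vals j 0 ≤ n)
    (hp : pos.length = (n + 1).toNat)
    (hc : count = 1 + pvF n pos) :
    (sw.foldl (solveStepA n) (vals, pos, count, res)).2.2.2
      = (sw.foldl (solveStepB n) (vals, pos, res)).2.2 := by
  induction sw generalizing vals pos count res with
  | nil => rfl
  | cons p sw ih =>
    obtain ⟨l, r⟩ := p
    obtain ⟨hl1, hl2, hr1, hr2⟩ := hsw (l, r) List.mem_cons_self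
    have hn1 : 1 ≤ n := le_trans hl1 hl2
    set u := PySem.List.pyGetD vals l 0 with hu_def
    set v := PySem.List.pyGetD vals r 0 with hv_def
    obtain ⟨hu1, hu2⟩ := hvals l hl1 hl2
    obtain ⟨hv1, hv2⟩ := hvals r hr1 hr2
    set vals' := PySem.List.pySetD (PySem.List.pySetD vals l v) r u with hvals'_def
    have hvlen' : vals'.length = vals.length := by
      rw [hvals'_def, PySem.List.length_pySetD, PySem.List.length_pySetD]
    have hgetl : PySem.List.pyGetD vals' l 0 = v := by
      rw [hvals'_def, PySem.List.pySetD_of_nonneg _ _ (by omega),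
          PySem.List.pySetD_of_nonneg _ _ (by omega),
          PySem.List.pyGetD_eq_getElem _ _ (by omega) (by simp; omega)]
      by_cases hlr : l = r
      · subst hlr
        rw [List.getElem_set_self (by simp; omega)]
      · rw [List.getElem_set_ne (by omega), List.getElem_set_self (by simp; omega)]
    have hgetr : PySem.List.pyGetD vals' r 0 = u := by
      rw [hvals'_def, PySem.List.pySetD_of_nonneg _ _ (by omega),
          PySem.List.pySetD_of_nonneg _ _ (by omega),
          PySem.List.pyGetD_eq_getElem _ _ (by omega) (by simp; omega),
          List.getElem_set_self (by simp; omega)]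
    rw [List.foldl_cons, List.foldl_cons]
    simp only [solveStepA, solveStepB]
    rw [← hu_def, ← hv_def, ← hvals'_def, hgetl, hgetr]
    set pos2 := PySem.List.pySetD (PySem.List.pySetD pos v l) u r with hpos2_def
    have hmem := pv_pairs_mem n u v
    have hPnodup : (solvePairs n u v).Nodup := pv_pairs_nodup n u v
    have hPmem : ∀ p ∈ solvePairs n u v, ∃ i : Int, p = (i, i + 1) ∧ 1 ≤ i ∧ i + 1 ≤ n := by
      intro p hpP
      rcases (hmem p).mp hpP with ⟨h, rfl⟩ | ⟨h, rfl⟩ | ⟨h, rfl⟩ | ⟨h, rfl⟩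
      · exact ⟨u, rfl, by omega, by omega⟩
      · exact ⟨u - 1, by norm_num, by omega, by omega⟩
      · exact ⟨v, rfl, by omega, by omega⟩
      · exact ⟨v - 1, by norm_num, by omega, by omega⟩
    have hcov : ∀ i : Int, 1 ≤ i → i + 1 ≤ n → (i = u ∨ i = v ∨ i + 1 = u ∨ i + 1 = v) → (i, i + 1) ∈ solvePairs n u v := by
      intro i hi1 hi2 hcase
      rw [hmem]
      rcases hcase with rfl | rfl | hiu | hiv
      · exact Or.inl ⟨by omega, rfl⟩
      · exact Or.inr (Or.inr (Or.inl ⟨by omega, rfl⟩))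
      · exact Or.inr (Or.inl ⟨by omega, by simp only [Prod.mk.injEq]; omega⟩)
      · exact Or.inr (Or.inr (Or.inr ⟨by omega, by simp only [Prod.mk.injEq]; omega⟩))
    have hcount := pv_count_step n pos hp u v l r hu1 hv1 (solvePairs n u v) hPnodup hPmem hcov
    rw [← hpos2_def] at hcount
    simp only [pvPair] at hcount
    rw [hc, hcount]
    have hSB : (1 : Int) + ((PySem.List.pyRange 1 n 1).map
        (fun j => if PySem.List.pyGetD pos2 j 0 > PySem.List.pyGetD pos2 (j + 1) 0 then (1 : Int) else 0)).sum
        = 1 + pvF n pos2 := by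
      simp [pvF, pvPair]
    rw [hSB]
    apply ih
    · intro p hpmem
      exact hsw p (List.mem_cons_of_mem _ hpmem)
    · rw [hvlen']
      exact hvlen
    · intro j hj1 hj2
      have hjlen : j.toNat < vals.length := by omega
      have hbase := hvals j hj1 hj2
      rw [PySem.List.pyGetD_eq_getElem _ _ (by omega) (by omega)] at hbase
      rw [hvals'_def, PySem.List.pySetD_of_nonneg _ _ (by omega),
          PySem.List.pySetD_of_nonneg _ _ (by omega),
          PySem.List.pyGetD_eq_getElem _ _ (by omega) (by simp; omega)]
      rw [List.getElem_set, List.getElem_set]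
      split_ifs <;>
        first
          | exact ⟨hu1, hu2⟩
          | exact ⟨hv1, hv2⟩
          | exact hbase
    · rw [hpos2_def, PySem.List.length_pySetD, PySem.List.length_pySetD]
      exact hp
    · rfl

-- 'for i in range(m): ... swaps[i] ...' is a fold over the first m swaps
theorem pv_take_fold {σ : Type} (m : Int) (swaps : List (Int × Int)) (hm : m ≤ (swaps.length : Int))
    (f : σ → Int × Int → σ) (init : σ) :
    (PySem.List.pyRange 0 m 1).foldl (fun st i => f st (PySem.List.pyGetD swaps i (0, 0))) init
      = (swaps.take m.toNat).foldl f init := by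
  by_cases h0 : m ≤ 0
  · have h1 : PySem.List.pyRange 0 m 1 = [] := by
      simp [PySem.List.pyRange]; omega
    have h2 : m.toNat = 0 := by omega
    simp [h1, h2]
  · have hlen : ((swaps.take m.toNat).length : Int) = m := by
      simp; omega
    have := PySem.List.foldl_pyRange_pyGetD (xs := swaps.take m.toNat) (a := 0)
      (f := f) (d := ((0:Int),(0:Int))) (init := init) (by omega)
    rw [PySem.List.len_eq] at this
    rw [hlen] at this
    simp only [Int.toNat_zero, List.drop_zero] at this
    rw [← this]
    apply PySem.List.foldl_congr_mem
    intro acc i hi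
    have hib := (PySem.List.mem_pyRange_one).mp hi
    congr 1
    rw [PySem.List.pyGetD_eq_getElem _ _ (by omega) (by omega),
        PySem.List.pyGetD_eq_getElem _ _ (by omega) (by rw [hlen]; omega)]
    simp [List.getElem_take]

theorem pv_build_len (l : List Int) (g : Int → Int) (pos : List Int) :
    (l.foldl (fun pos i => PySem.List.pySetD pos (g i) i) pos).length = pos.length := by
  induction l generalizing pos with
  | nil => rfl
  | cons x xs ih => simp [List.foldl, PySem.List.length_pySetD, ih]

theorem solve_eq_alt (n : Int) (m : Int) (values : List Int) (swaps : List (Int × Int))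
    (hpre : Pre_solve n m values swaps) : solve n m values swaps = solve_alt n m values swaps := by
  obtain ⟨hm, hn, hvalsPre, hswPre⟩ := hpre
  unfold solve solve_alt
  dsimp only
  rw [pv_take_fold m swaps hm, pv_take_fold m swaps hm]
  set vals0 : List Int := 0 :: values with hvals0_def
  set pos0 := (PySem.List.pyRange 1 (n + 1) 1).foldl
      (fun pos i => PySem.List.pySetD pos (PySem.List.pyGetD vals0 i 0) i)
      (List.replicate (n + 1).toNat 0) with hpos0_def
  have hp0 : pos0.length = (n + 1).toNat := by
    rw [hpos0_def, pv_build_len _ (fun i => PySem.List.pyGetD vals0 i 0), List.length_replicate]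
  have hc0 : (PySem.List.pyRange 1 n 1).foldl
      (fun c i => c + (if PySem.List.pyGetD pos0 i 0 > PySem.List.pyGetD pos0 (i + 1) 0 then 1 else 0)) 1
      = 1 + pvF n pos0 := by
    rw [PySem.List.foldl_add _ (fun i => if PySem.List.pyGetD pos0 i 0 > PySem.List.pyGetD pos0 (i + 1) 0 then 1 else 0)]
    simp [pvF, pvPair]
  rw [hc0]
  apply pv_loop_agree
  · exact hswPre
  · rw [hvals0_def]; simp; omega
  · intro j hj1 hj2
    have hjlen : j.toNat - 1 < values.length := by omega
    rw [hvals0_def, PySem.List.pyGetD_eq_getElem _ _ (by omega) (by simp; omega)]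
    have hne0 : j.toNat ≠ 0 := by omega
    rw [List.getElem_cons]
    rw [dif_neg hne0]
    have hmem : values[j.toNat - 1] ∈ values.take n.toNat := by
      have hlt : j.toNat - 1 < n.toNat := by omega
      have := List.getElem_take (xs := values) (i := j.toNat - 1)
        (h := by simp; omega) (j := n.toNat)
      rw [← this]
      exact List.getElem_mem _
    exact hvalsPre _ hmem
  · exact hp0
  · rfl

-- ===== VERDICT (by name: the statement is the Claim_ definition above) =====
theorem solve_spec : Claim_equal_solve := by
  unfold Claim_equal_solve Spec_solve
  intro n m values swaps _ hpre
  exact solve_eq_alt n m values swaps hpre
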